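-- pv_equiv track=rewrite | github.com/plataformasindigenas/boeenomoto | scripts/migrate_encyclopedia_to_yaml.py | _repair_missing_commas
-- ===== SOURCE A (Python) =====
-- def _repair_missing_commas(text: str) -> str:
--     result: list[str] = []
--     in_string = False
--     escape = False
--
--     for i, ch in enumerate(text):
--         result.append(ch)
--
--         if in_string:
--             if escape:
--                 escape = False
--             elif ch == "\\":
--                 escape = True
--             elif ch == "\"":
--                 in_string = False
--             continue
--
--         if ch == "\"":
--             in_string = True
--             continue
--
--         if ch == "}":
--             j = i + 1
--             while j < len(text) and text[j].isspace():
--                 j += 1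
--             if j < len(text) and text[j] == "{":
--                 result.append(",")
--
--     return "".join(result)
-- ===== SOURCE B (Python) =====
-- def _repair_missing_commas(text: str) -> str:
--     # Pass 1: mark each character with whether it lies inside a string literal.
--     marked = []
--     in_string = False
--     escape = False
--     for ch in text:
--         marked.append((ch, in_string))
--         if in_string:
--             if escape:
--                 escape = False
--             elif ch == "\\":
--                 escape = True
--             elif ch == "\"":
--                 in_string = False
--         elif ch == "\"":
--             in_string = True
--     # Pass 2: right-to-left, carry a flag "the next non-space character is '{'".
--     out = []
--     brace_ahead = False
--     for ch, inside in reversed(marked):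
--         if ch == "}" and not inside and brace_ahead:
--             out.append(",")
--         out.append(ch)
--         if ch == "{":
--             brace_ahead = True
--         elif not ch.isspace():
--             brace_ahead = False
--     out.reverse()
--     return "".join(out)
-- ===== Notes on version B (the rewrite author's own statement) =====
-- stated objective: alternative
-- what changed: Replaced A's single pass with an in-loop forward whitespace lookahead by a two-pass scheme: pass 1 marks each character with its in-string state, pass 2 scans right-to-left carrying a boolean flag meaning the nearest following non-whitespace character is an opening brace, so commas are inserted without any forward scanning.
import Mathlib
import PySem

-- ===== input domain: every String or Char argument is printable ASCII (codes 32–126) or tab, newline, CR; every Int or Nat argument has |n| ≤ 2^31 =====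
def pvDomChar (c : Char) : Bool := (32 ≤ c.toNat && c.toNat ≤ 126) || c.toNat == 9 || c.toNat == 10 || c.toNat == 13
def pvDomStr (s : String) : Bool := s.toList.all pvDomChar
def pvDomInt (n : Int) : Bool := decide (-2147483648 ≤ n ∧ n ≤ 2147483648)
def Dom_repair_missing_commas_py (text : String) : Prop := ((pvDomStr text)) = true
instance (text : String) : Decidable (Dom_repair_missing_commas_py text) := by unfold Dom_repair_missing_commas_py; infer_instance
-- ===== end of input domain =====

-- B replaces A's in-loop forward whitespace lookahead by a two-pass scheme (mark in-string state,
-- then scan right-to-left carrying a brace-ahead flag); objective: alternative.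


-- ===== PORT A =====
-- `while j < len(text) and text[j].isspace(): j += 1`
def pvSkipWs (tl : List Char) (j : Nat) : Nat :=
  if h : j < tl.length then
    if PySem.Chars.isspace tl[j] then pvSkipWs tl (j + 1) else j
  else j
termination_by tl.length - j

-- `enumerate(text)` (indices as Nat; Python's indices here are the nonnegative positions 0..len-1)
def pvEnum (i : Nat) : List Char → List (Nat × Char)
  | [] => []
  | c :: r => (i, c) :: pvEnum (i + 1) r

-- one iteration of A's `for i, ch in enumerate(text)` body over state (result, in_string, escape)
def pvAStep (tl : List Char) (st : List Char × Bool × Bool) (ic : Nat × Char) :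
    List Char × Bool × Bool :=
  let result := st.1 ++ [ic.2]
  let in_string := st.2.1
  let escape := st.2.2
  if in_string then
    if escape then (result, true, false)
    else if ic.2 = '\\' then (result, true, true)
    else if ic.2 = '"' then (result, false, escape)
    else (result, true, escape)
  else if ic.2 = '"' then (result, true, escape)
  else if ic.2 = '}' then
    let j := pvSkipWs tl (ic.1 + 1)
    -- `j < len(text) and text[j] == "{"` expressed via optional indexing (exact: tl[j]? = some c ↔ j < len ∧ tl[j] = c)
    if tl[j]? = some '{' then (result ++ [','], false, escape)
    else (result, false, escape)
  else (result, false, escape)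

def repair_missing_commas_py (text : String) : String :=
  let tl := text.toList
  String.mk ((pvEnum 0 tl).foldl (pvAStep tl) ([], false, false)).1

-- ===== PORT B =====
-- pass 1 body: append (ch, in_string) then update the string state exactly as A's state machine does
def pvMaskStep (st : List (Char × Bool) × Bool × Bool) (ch : Char) :
    List (Char × Bool) × Bool × Bool :=
  let m := st.1 ++ [(ch, st.2.1)]
  let in_string := st.2.1
  let escape := st.2.2
  if in_string then
    if escape then (m, true, false)
    else if ch = '\\' then (m, true, true)
    else if ch = '"' then (m, false, escape)
    else (m, true, escape)
  else if ch = '"' then (m, true, escape)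
  else (m, false, escape)

-- pass 2 body: right-to-left over the marked list with the `brace_ahead` flag
def pvOutStep (st : List Char × Bool) (p : Char × Bool) : List Char × Bool :=
  let out := if p.1 = '}' ∧ p.2 = false ∧ st.2 = true then st.1 ++ [','] else st.1
  let out := out ++ [p.1]
  let brace := if p.1 = '{' then true else if PySem.Chars.isspace p.1 then st.2 else false
  (out, brace)

def repair_missing_commas_py_alt (text : String) : String :=
  let marked := (text.toList.foldl pvMaskStep ([], false, false)).1
  let second := marked.reverse.foldl pvOutStep ([], false)
  String.mk second.1.reverse

-- ===== PRECONDITION & SPEC =====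
def Spec_repair_missing_commas_py (text : String) (out : String) : Prop := out = repair_missing_commas_py_alt text
instance (text : String) (out : String) : Decidable (Spec_repair_missing_commas_py text out) := by unfold Spec_repair_missing_commas_py; infer_instance

-- ===== CLAIM (what is proved, stated in full; the proofs are below) =====
def Claim_equal_repair_missing_commas_py : Prop := ∀ (text : String), Dom_repair_missing_commas_py text → Spec_repair_missing_commas_py text (repair_missing_commas_py text)

-- ===== LEMMAS AND PROOFS =====

-- common normal form of both programs: structural state machine, comma decided by dropWhile on the suffix
def pvNorm : Bool → Bool → List Char → List Char
  | _, _, [] => []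
  | true, esc, c :: r =>
      c :: (if esc then pvNorm true false r
            else if c = '\\' then pvNorm true true r
            else if c = '"' then pvNorm false esc r
            else pvNorm true esc r)
  | false, esc, c :: r =>
      if c = '"' then c :: pvNorm true esc r
      else if c = '}' ∧ ((r.dropWhile PySem.Chars.isspace).head? = some '{') then
        c :: ',' :: pvNorm false esc r
      else c :: pvNorm false esc r

lemma skipWs_drop (tl : List Char) (j : Nat) :
    tl.drop (pvSkipWs tl j) = (tl.drop j).dropWhile PySem.Chars.isspace := by
  fun_induction pvSkipWs tl j with
  | case1 j h hsp ih =>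
    rw [ih, List.drop_eq_getElem_cons h, List.dropWhile_cons, if_pos hsp]
  | case2 j h hsp =>
    rw [List.drop_eq_getElem_cons h, List.dropWhile_cons, if_neg hsp,
        ← List.drop_eq_getElem_cons h]
  | case3 j h =>
    rw [List.drop_eq_nil_of_le (by omega)]
    simp

lemma A_fold (tl : List Char) :
    ∀ (r : List Char) (i : Nat) (acc : List Char) (inS esc : Bool), tl.drop i = r →
      ((pvEnum i r).foldl (pvAStep tl) (acc, inS, esc)).1 = acc ++ pvNorm inS esc r := by
  intro r
  induction r with
  | nil => intro i acc inS esc _; simp [pvEnum, pvNorm]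
  | cons c r ih =>
    intro i acc inS esc h
    have hdrop : tl.drop (i + 1) = r := by
      rw [← List.drop_drop, h]; rfl
    have hget : tl[pvSkipWs tl (i + 1)]? = (r.dropWhile PySem.Chars.isspace).head? := by
      rw [← List.head?_drop, skipWs_drop, hdrop]
    simp only [pvEnum, List.foldl_cons, pvAStep]
    cases inS with
    | true =>
      cases esc with
      | true => simp only [if_pos trivial]
                rw [ih _ _ _ _ hdrop]; simp [pvNorm]
      | false =>
        by_cases hb : c = '\\'
        · simp only [hb]; rw [ih _ _ _ _ hdrop]; simp [pvNorm]
        · by_cases hq : c = '"'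
          · simp only [hq]; rw [ih _ _ _ _ hdrop]; simp [pvNorm]
          · simp only [if_neg hb, if_neg hq]; rw [ih _ _ _ _ hdrop]; simp [pvNorm, hb, hq]
    | false =>
      by_cases hq : c = '"'
      · simp only [hq]; rw [ih _ _ _ _ hdrop]; simp [pvNorm]
      · by_cases hr : c = '}'
        · subst hr
          simp only [if_neg hq]
          rw [hget]
          by_cases hl : (r.dropWhile PySem.Chars.isspace).head? = some '{'
          · rw [if_pos hl, ih _ _ _ _ hdrop]
            simp [pvNorm, hq, hl]
          · rw [if_neg hl, ih _ _ _ _ hdrop]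
            simp [pvNorm, hq, hl]
        · simp only [if_neg hq, if_neg hr]; rw [ih _ _ _ _ hdrop]
          simp [pvNorm, hq, hr]

def pvMask : Bool → Bool → List Char → List (Char × Bool)
  | _, _, [] => []
  | true, esc, c :: r =>
      (c, true) :: (if esc then pvMask true false r
                    else if c = '\\' then pvMask true true r
                    else if c = '"' then pvMask false esc r
                    else pvMask true esc r)
  | false, esc, c :: r =>
      (c, false) :: (if c = '"' then pvMask true esc r else pvMask false esc r)

def pvFlag (l : List (Char × Bool)) : Bool :=
  decide (((l.map Prod.fst).dropWhile PySem.Chars.isspace).head? = some '{')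

def pvEmit : List (Char × Bool) → List Char
  | [] => []
  | (c, ins) :: r => (if c = '}' ∧ ins = false ∧ pvFlag r = true then [c, ','] else [c]) ++ pvEmit r

lemma mask_fold : ∀ (l : List Char) (acc : List (Char × Bool)) (s e : Bool),
    (l.foldl pvMaskStep (acc, s, e)).1 = acc ++ pvMask s e l := by
  intro l
  induction l with
  | nil => intro acc s e; simp [pvMask]
  | cons c r ih =>
    intro acc s e
    simp only [List.foldl_cons, pvMaskStep]
    cases s <;> cases e <;> split_ifs <;> simp_all [pvMask]

lemma flag_cons (c : Char) (ins : Bool) (r : List (Char × Bool)) :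
    pvFlag ((c, ins) :: r)
      = if c = '{' then true else if PySem.Chars.isspace c then pvFlag r else false := by
  unfold pvFlag
  simp only [List.map_cons, List.dropWhile_cons]
  by_cases hs : PySem.Chars.isspace c
  · have hc : c ≠ '{' := by rintro rfl; exact absurd hs (by decide)
    simp [hs, hc]
  · simp only [hs, Bool.false_eq_true, if_false, List.head?_cons]
    by_cases hc : c = '{' <;> simp [hc]

lemma out_foldr : ∀ (l : List (Char × Bool)) (acc : List Char),
    l.foldr (fun x a => pvOutStep a x) (acc, false) = (acc ++ (pvEmit l).reverse, pvFlag l) := by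
  intro l
  induction l with
  | nil => intro acc; simp [pvEmit, pvFlag]
  | cons p r ih =>
    intro acc
    obtain ⟨c, ins⟩ := p
    rw [List.foldr_cons, ih]
    simp only [pvOutStep, pvEmit, flag_cons]
    by_cases h : c = '}' ∧ ins = false ∧ pvFlag r = true
    · obtain ⟨rfl, rfl, hf⟩ := h
      simp [hf, List.append_assoc]
    · simp only [if_neg h, Prod.mk.injEq]
      exact ⟨by simp [List.append_assoc], trivial⟩

lemma mask_fst : ∀ (l : List Char) (s e : Bool), (pvMask s e l).map Prod.fst = l := by
  intro l
  induction l with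
  | nil => intro s e; cases s <;> simp [pvMask]
  | cons c r ih =>
    intro s e
    cases s <;> cases e <;> simp only [pvMask] <;> split_ifs <;> simp [ih]

lemma flag_mask (r : List Char) (s e : Bool) :
    pvFlag (pvMask s e r) = decide ((r.dropWhile PySem.Chars.isspace).head? = some '{') := by
  unfold pvFlag
  rw [mask_fst]

lemma emit_mask : ∀ (l : List Char) (s e : Bool), pvEmit (pvMask s e l) = pvNorm s e l := by
  intro l
  induction l with
  | nil => intro s e; cases s <;> simp [pvMask, pvNorm, pvEmit]
  | cons c r ih =>
    intro s e
    cases s with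
    | true =>
      simp only [pvMask, pvNorm]
      split_ifs <;> simp [pvEmit, ih]
    | false =>
      simp only [pvMask, pvNorm]
      by_cases hq : c = '"'
      · simp [hq, pvEmit, ih]
      · by_cases hr : c = '}'
        · subst hr
          simp only [if_neg hq, pvEmit, flag_mask]
          by_cases hl : (r.dropWhile PySem.Chars.isspace).head? = some '{'
          · simp [hl, ih]
          · simp [hl, ih]
        · simp [hq, hr, pvEmit, ih, flag_mask]

-- ===== VERDICT (by name: the statement is the Claim_ definition above) =====
theorem repair_missing_commas_py_spec : Claim_equal_repair_missing_commas_py := by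
  intro text _
  show String.mk ((pvEnum 0 text.toList).foldl (pvAStep text.toList) ([], false, false)).1
      = String.mk ((text.toList.foldl pvMaskStep ([], false, false)).1.reverse.foldl pvOutStep ([], false)).1.reverse
  rw [A_fold text.toList text.toList 0 [] false false rfl]
  rw [mask_fold text.toList [] false false, List.foldl_reverse]
  simp only [List.nil_append]
  rw [out_foldr (pvMask false false text.toList) [], emit_mask]
  simp
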